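-- pv_equiv track=rewrite | github.com/wjw12/ml-intern | agent/utils/terminal_display.py | format_plan_tool_output
-- ===== SOURCE A (Python) =====
-- def format_plan_tool_output(todos: list) -> str:
--     if not todos:
--         return "Plan is empty."
--
--     lines = ["Plan updated:", ""]
--     completed = [t for t in todos if t["status"] == "completed"]
--     in_progress = [t for t in todos if t["status"] == "in_progress"]
--     pending = [t for t in todos if t["status"] == "pending"]
--
--     for t in completed:
--         lines.append(f"  [x] {t['id']}. {t['content']}")
--     for t in in_progress:
--         lines.append(f"  [~] {t['id']}. {t['content']}")
--     for t in pending: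
--         lines.append(f"  [ ] {t['id']}. {t['content']}")
--
--     lines.append(f"\n{len(completed)}/{len(todos)} done")
--     return "\n".join(lines)
-- ===== SOURCE B (Python) =====
-- def format_plan_tool_output(todos: list) -> str:
--     if not todos:
--         return "Plan is empty."
--
--     rank = {"completed": 0, "in_progress": 1, "pending": 2}
--     marker = ["[x]", "[~]", "[ ]"]
--     ordered = sorted(todos, key=lambda t: rank.get(t["status"], 3))
--
--     out = "Plan updated:\n"
--     done = 0
--     for t in ordered:
--         r = rank.get(t["status"], 3)
--         if r < 3:
--             out += f"\n  {marker[r]} {t['id']}. {t['content']}"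
--             done += r == 0
--     return out + f"\n\n{done}/{len(todos)} done"
-- ===== Notes on version B (the rewrite author's own statement) =====
-- stated objective: alternative
-- what changed: Replaces A's three filter passes plus list-of-lines join with a sort-then-scan: B stably sorts the todos by a numeric status rank (completed<in_progress<pending<other) and then emits the whole report in one scan with a string accumulator and a running done-count; correctness rests on the stable sort by rank being exactly A's three filtered groups concatenated.
import Mathlib
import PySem

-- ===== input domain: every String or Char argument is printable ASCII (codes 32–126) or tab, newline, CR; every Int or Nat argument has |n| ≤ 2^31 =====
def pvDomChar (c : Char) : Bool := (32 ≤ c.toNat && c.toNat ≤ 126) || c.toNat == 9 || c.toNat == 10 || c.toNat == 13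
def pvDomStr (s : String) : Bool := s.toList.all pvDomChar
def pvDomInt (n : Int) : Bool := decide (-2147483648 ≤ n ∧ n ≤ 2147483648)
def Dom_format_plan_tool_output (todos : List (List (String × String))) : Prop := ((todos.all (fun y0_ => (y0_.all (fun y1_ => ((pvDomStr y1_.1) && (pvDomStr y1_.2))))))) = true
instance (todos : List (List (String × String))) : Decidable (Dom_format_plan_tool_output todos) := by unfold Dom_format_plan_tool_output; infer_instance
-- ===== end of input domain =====

-- B sorts the todos stably by a status rank (completed<in_progress<pending<other) and then emits the
-- report in ONE scan with a string accumulator and a running done-count, instead of A's three filter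
-- passes joined at the end; equal cost, different algorithm (sort-then-scan vs filter-and-join).


-- ===== PORT A =====
-- t["status"] / t["id"] / t["content"]: total stand-ins, exact under Pre_ (key present)
def pvStatus (t : List (String × String)) : String := (PySem.Dict.ofList t).getD "status" ""
def pvId (t : List (String × String)) : String := (PySem.Dict.ofList t).getD "id" ""
def pvContent (t : List (String × String)) : String := (PySem.Dict.ofList t).getD "content" ""
-- f"  {marker} {t['id']}. {t['content']}"
def pvLine (marker : String) (t : List (String × String)) : String :=
  "  " ++ marker ++ " " ++ pvId t ++ ". " ++ pvContent t

def format_plan_tool_output (todos : List (List (String × String))) : String :=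
  if todos = [] then "Plan is empty."
  else
    let completed := todos.filter (fun t => pvStatus t == "completed")
    let in_progress := todos.filter (fun t => pvStatus t == "in_progress")
    let pending := todos.filter (fun t => pvStatus t == "pending")
    let lines := ["Plan updated:", ""]
      ++ completed.map (pvLine "[x]")
      ++ in_progress.map (pvLine "[~]")
      ++ pending.map (pvLine "[ ]")
      ++ ["\n" ++ PySem.Int.toStr (completed.length : Int) ++ "/" ++ PySem.Int.toStr (todos.length : Int) ++ " done"]
    PySem.Str.join "\n" lines

-- ===== PORT B =====
-- rank = {"completed": 0, "in_progress": 1, "pending": 2}; rank.get(t["status"], 3)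
def pvRankDict : PySem.Dict String Nat := PySem.Dict.ofList [("completed", 0), ("in_progress", 1), ("pending", 2)]
def pvRank (t : List (String × String)) : Nat := pvRankDict.getD (pvStatus t) 3
-- marker = ["[x]", "[~]", "[ ]"]
def pvMarkers : List String := ["[x]", "[~]", "[ ]"]

def format_plan_tool_output_alt (todos : List (List (String × String))) : String :=
  if todos = [] then "Plan is empty."
  else
    -- ordered = sorted(todos, key=lambda t: rank.get(t["status"], 3))  (stable)
    let ordered := PySem.List.sorted todos pvRank
    -- single scan: out string accumulator and running done count
    -- marker[r]: r < 3 is guarded, so the total getD is exact here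
    let res := ordered.foldl
      (fun (st : String × Nat) t =>
        let r := pvRank t
        if r < 3 then
          (st.1 ++ ("\n  " ++ pvMarkers.getD r "" ++ " " ++ pvId t ++ ". " ++ pvContent t),
           st.2 + (if r = 0 then 1 else 0))
        else st)
      ("Plan updated:\n", 0)
    res.1 ++ ("\n\n" ++ PySem.Int.toStr (res.2 : Int) ++ "/" ++ PySem.Int.toStr (todos.length : Int) ++ " done")

-- ===== PRECONDITION & SPEC =====
-- Pre_ excludes exactly the inputs where A raises KeyError: a todo without a "status" key,
-- or a todo whose status is one of the three printed groups but lacks "id" or "content".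
def Pre_format_plan_tool_output (todos : List (List (String × String))) : Prop :=
  ∀ t ∈ todos, (PySem.Dict.ofList t).contains "status" = true ∧
    ((pvStatus t = "completed" ∨ pvStatus t = "in_progress" ∨ pvStatus t = "pending") →
      (PySem.Dict.ofList t).contains "id" = true ∧ (PySem.Dict.ofList t).contains "content" = true)
instance (todos : List (List (String × String))) : Decidable (Pre_format_plan_tool_output todos) := by
  unfold Pre_format_plan_tool_output; infer_instance

def pvWitness_format_plan_tool_output : (List (List (String × String))) :=
  [[("status", "completed"), ("id", "1"), ("content", "a")]]

def Spec_format_plan_tool_output (todos : List (List (String × String))) (out : String) : Prop := out = format_plan_tool_output_alt todos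
instance (todos : List (List (String × String))) (out : String) : Decidable (Spec_format_plan_tool_output todos out) := by unfold Spec_format_plan_tool_output; infer_instance

-- ===== CLAIM (what is proved, stated in full; the proofs are below) =====
def Claim_equal_format_plan_tool_output : Prop := ∀ (todos : List (List (String × String))), Dom_format_plan_tool_output todos → Pre_format_plan_tool_output todos → Spec_format_plan_tool_output todos (format_plan_tool_output todos)

-- ===== LEMMAS AND PROOFS =====

-- rank as a chain of ifs on the status
theorem pvRank_eq (t : List (String × String)) :
    pvRank t = if pvStatus t = "pending" then 2 else if pvStatus t = "in_progress" then 1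
      else if pvStatus t = "completed" then 0 else 3 := by
  show (((PySem.Dict.empty.insert "completed" 0).insert "in_progress" 1).insert "pending" 2).getD (pvStatus t) 3 = _
  simp [PySem.Dict.getD_insert, PySem.Dict.getD_empty]

theorem pvRank_zero_iff (t : List (String × String)) : pvRank t = 0 ↔ pvStatus t = "completed" := by
  rw [pvRank_eq]; split_ifs with h1 h2 h3 <;> simp_all
theorem pvRank_one_iff (t : List (String × String)) : pvRank t = 1 ↔ pvStatus t = "in_progress" := by
  rw [pvRank_eq]; split_ifs with h1 h2 h3 <;> simp_all
theorem pvRank_two_iff (t : List (String × String)) : pvRank t = 2 ↔ pvStatus t = "pending" := by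
  rw [pvRank_eq]; split_ifs with h1 h2 h3 <;> simp_all
theorem pvRank_le_three (t : List (String × String)) : pvRank t ≤ 3 := by
  rw [pvRank_eq]; split_ifs <;> omega

-- buckets
def pvF (i : Nat) (todos : List (List (String × String))) : List (List (String × String)) :=
  todos.filter (fun t => pvRank t == i)

theorem mem_pvF {i : Nat} {todos t} (h : t ∈ pvF i todos) : pvRank t = i := by
  simp [pvF, List.mem_filter] at h; exact h.2

-- inserting x into L ++ M where L is all ≤ and M is all > lands x between them
theorem insertBy_between (x : List (String × String)) (L M : List (List (String × String)))
    (hL : ∀ y ∈ L, ¬ pvRank x < pvRank y) (hM : ∀ y ∈ M, pvRank x < pvRank y) :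
    PySem.List.insertBy (fun a b => decide (pvRank a < pvRank b)) x (L ++ M) = L ++ x :: M := by
  induction L with
  | nil =>
    cases M with
    | nil => simp [PySem.List.insertBy]
    | cons m ms => simp [PySem.List.insertBy, hM m (by simp)]
  | cons l ls ih =>
    have := hL l (by simp)
    simp only [List.cons_append, PySem.List.insertBy, decide_eq_true_eq]
    rw [if_neg this, ih (fun y hy => hL y (by simp [hy]))]

-- the stable sort by rank is the four rank-buckets concatenated in order
theorem sorted_rank_eq (todos : List (List (String × String))) :
    PySem.List.sorted todos pvRank = pvF 0 todos ++ pvF 1 todos ++ pvF 2 todos ++ pvF 3 todos := by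
  rw [PySem.List.sorted_eq_foldl_insertBy]
  induction todos using List.reverseRecOn with
  | nil => simp [pvF]
  | append_singleton xs x ih =>
    rw [List.foldl_append, List.foldl_cons, List.foldl_nil, ih]
    have hx := pvRank_le_three x
    have hmem : ∀ i, ∀ y ∈ pvF i xs, pvRank y = i := fun i y hy => mem_pvF hy
    have hf : ∀ i, pvF i (xs ++ [x]) = pvF i xs ++ if pvRank x = i then [x] else [] := by
      intro i; simp [pvF, List.filter_append, List.filter_singleton, beq_iff_eq]
    interval_cases h : pvRank x
    · have step := insertBy_between x (pvF 0 xs) (pvF 1 xs ++ pvF 2 xs ++ pvF 3 xs)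
        (fun y hy => by have := hmem 0 y hy; omega)
        (fun y hy => by
          simp only [List.mem_append] at hy
          rcases hy with (hy | hy) | hy <;>
            (first | have := hmem 1 y hy | have := hmem 2 y hy | have := hmem 3 y hy) <;> omega)
      rw [show pvF 0 xs ++ pvF 1 xs ++ pvF 2 xs ++ pvF 3 xs
            = pvF 0 xs ++ (pvF 1 xs ++ pvF 2 xs ++ pvF 3 xs) by simp [List.append_assoc], step]
      simp [hf, List.append_assoc]
    · have step := insertBy_between x (pvF 0 xs ++ pvF 1 xs) (pvF 2 xs ++ pvF 3 xs)
        (fun y hy => by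
          simp only [List.mem_append] at hy
          rcases hy with hy | hy <;> (first | have := hmem 0 y hy | have := hmem 1 y hy) <;> omega)
        (fun y hy => by
          simp only [List.mem_append] at hy
          rcases hy with hy | hy <;> (first | have := hmem 2 y hy | have := hmem 3 y hy) <;> omega)
      rw [show pvF 0 xs ++ pvF 1 xs ++ pvF 2 xs ++ pvF 3 xs
            = (pvF 0 xs ++ pvF 1 xs) ++ (pvF 2 xs ++ pvF 3 xs) by simp [List.append_assoc], step]
      simp [hf, List.append_assoc]
    · have step := insertBy_between x (pvF 0 xs ++ pvF 1 xs ++ pvF 2 xs) (pvF 3 xs)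
        (fun y hy => by
          simp only [List.mem_append] at hy
          rcases hy with (hy | hy) | hy <;>
            (first | have := hmem 0 y hy | have := hmem 1 y hy | have := hmem 2 y hy) <;> omega)
        (fun y hy => by have := hmem 3 y hy; omega)
      rw [step]
      simp [hf, List.append_assoc]
    · have step := insertBy_between x (pvF 0 xs ++ pvF 1 xs ++ pvF 2 xs ++ pvF 3 xs) []
        (fun y hy => by
          simp only [List.mem_append] at hy
          rcases hy with ((hy | hy) | hy) | hy <;>
            (first | have := hmem 0 y hy | have := hmem 1 y hy | have := hmem 2 y hy | have := hmem 3 y hy) <;> omega)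
        (fun y hy => by simp at hy)
      rw [List.append_nil] at step
      rw [step]
      simp [hf, List.append_assoc]

-- what one element of B's scan emits
def pvEmit (t : List (String × String)) : String :=
  if pvRank t < 3 then "\n  " ++ pvMarkers.getD (pvRank t) "" ++ " " ++ pvId t ++ ". " ++ pvContent t else ""
def pvCat (L : List (List (String × String))) : String := L.foldr (fun t s => pvEmit t ++ s) ""

theorem pvCat_append (L M : List (List (String × String))) : pvCat (L ++ M) = pvCat L ++ pvCat M := by
  induction L with
  | nil => simp [pvCat]
  | cons t ts ih =>
    simp only [pvCat, List.foldr_cons, List.cons_append, List.foldr_append] at *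
    rw [ih]; rw [String.append_assoc]

-- B's scan in closed form
theorem foldl_scan (L : List (List (String × String))) (s : String) (n : Nat) :
    L.foldl
      (fun (st : String × Nat) t =>
        let r := pvRank t
        if r < 3 then
          (st.1 ++ ("\n  " ++ pvMarkers.getD r "" ++ " " ++ pvId t ++ ". " ++ pvContent t),
           st.2 + (if r = 0 then 1 else 0))
        else st)
      (s, n)
    = (s ++ pvCat L, n + L.countP (fun t => pvRank t == 0)) := by
  induction L generalizing s n with
  | nil => simp [pvCat]
  | cons t ts ih =>
    simp only [List.foldl_cons]
    by_cases h : pvRank t < 3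
    · rw [if_pos h, ih]
      have he : pvEmit t = "\n  " ++ pvMarkers.getD (pvRank t) "" ++ " " ++ pvId t ++ ". " ++ pvContent t := by
        simp [pvEmit, h]
      rw [Prod.mk.injEq]
      refine ⟨?_, ?_⟩
      · show s ++ _ ++ pvCat ts = s ++ pvCat (t :: ts)
        simp only [pvCat, List.foldr_cons]
        rw [← he, String.append_assoc]
      · simp only [List.countP_cons, beq_iff_eq]
        split_ifs <;> simp_all <;> omega
    · rw [if_neg h, ih]
      have h3 : pvRank t = 3 := by have := pvRank_le_three t; omega
      rw [Prod.mk.injEq]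
      refine ⟨?_, ?_⟩
      · show s ++ pvCat ts = s ++ pvCat (t :: ts)
        simp [pvCat, pvEmit, h3]
      · simp [h3]

-- join over a list ending in a tail element
theorem join_cons (s x : String) (xs : List String) (h : xs ≠ []) :
    PySem.Str.join s (x :: xs) = x ++ s ++ PySem.Str.join s xs := by
  cases xs with
  | nil => simp at h
  | cons y ys =>
    apply String.toList_inj.mp
    simp [PySem.Str.join, PySem.Chars.join, List.intercalate, String.toList_append]

theorem join_append_tail (L : List String) (tl : String) :
    PySem.Str.join "\n" (L ++ [tl]) = L.foldr (fun l s => l ++ "\n" ++ s) tl := by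
  induction L with
  | nil => simp [PySem.Str.join, PySem.Chars.join, List.intercalate]
  | cons l ls ih => rw [List.cons_append, join_cons _ _ _ (by simp), ih]; simp

def pvEmitLine (t : List (String × String)) : String := pvLine (pvMarkers.getD (pvRank t) "") t

theorem block_congr (i : Nat) (L : List (List (String × String))) (hL : ∀ t ∈ L, pvRank t = i) (z : String) :
    L.foldr (fun t s => pvLine (pvMarkers.getD i "") t ++ "\n" ++ s) z
      = L.foldr (fun t s => pvEmitLine t ++ ("\n" ++ s)) z := by
  induction L with
  | nil => rfl
  | cons t ts ih =>
    simp only [List.foldr_cons]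
    rw [ih (fun y hy => hL y (by simp [hy]))]
    rw [pvEmitLine, hL t (by simp), String.append_assoc]

theorem pvCat_eq_empty (L : List (List (String × String))) (h : ∀ t ∈ L, pvRank t = 3) :
    pvCat L = "" := by
  induction L with
  | nil => rfl
  | cons t ts ih =>
    simp only [pvCat, List.foldr_cons]
    rw [show pvEmit t = "" by simp [pvEmit, h t (by simp)]]
    have := ih (fun y hy => h y (by simp [hy]))
    simp only [pvCat] at this
    rw [this]
    simp

-- shift the separators: A attaches "\n" after each line, B before each line
theorem shift_newline (L : List (List (String × String))) (tl : String)
    (hL : ∀ t ∈ L, pvRank t < 3) :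
    "\n" ++ L.foldr (fun t s => pvEmitLine t ++ ("\n" ++ s)) tl = pvCat L ++ ("\n" ++ tl) := by
  induction L with
  | nil => simp [pvCat]
  | cons t ts ih =>
    have ht := hL t (by simp)
    have he : pvEmit t = "\n" ++ pvEmitLine t := by
      apply String.toList_inj.mp
      simp [pvEmit, ht, pvEmitLine, pvLine, String.toList_append]
    simp only [pvCat, List.foldr_cons] at *
    rw [← String.append_assoc, he]
    rw [String.append_assoc, String.append_assoc, ih (fun y hy => hL y (by simp [hy]))]
    simp [String.append_assoc]

theorem pvF0_eq (todos : List (List (String × String))) :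
    pvF 0 todos = todos.filter (fun t => pvStatus t == "completed") := by
  apply List.filter_congr; intro t _; simp [pvRank_zero_iff]
theorem pvF1_eq (todos : List (List (String × String))) :
    pvF 1 todos = todos.filter (fun t => pvStatus t == "in_progress") := by
  apply List.filter_congr; intro t _; simp [pvRank_one_iff]
theorem pvF2_eq (todos : List (List (String × String))) :
    pvF 2 todos = todos.filter (fun t => pvStatus t == "pending") := by
  apply List.filter_congr; intro t _; simp [pvRank_two_iff]

theorem format_plan_tool_output_eq (todos : List (List (String × String))) :
    format_plan_tool_output todos = format_plan_tool_output_alt todos := by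
  by_cases h : todos = []
  · simp [format_plan_tool_output, format_plan_tool_output_alt, h]
  · simp only [format_plan_tool_output, format_plan_tool_output_alt, if_neg h]
    rw [sorted_rank_eq, foldl_scan]
    have hmemF : ∀ i, ∀ y ∈ pvF i todos, pvRank y = i := fun i y hy => mem_pvF hy
    -- the done counts agree
    have hcnt : (pvF 0 todos ++ pvF 1 todos ++ pvF 2 todos ++ pvF 3 todos).countP (fun t => pvRank t == 0)
        = (todos.filter (fun t => pvStatus t == "completed")).length := by
      have hperm : (PySem.List.sorted todos pvRank).Perm todos := PySem.List.sorted_perm todos pvRank false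
      rw [sorted_rank_eq] at hperm
      rw [hperm.countP_eq, ← pvF0_eq]
      simp [pvF, List.countP_eq_length_filter]
    rw [hcnt, Nat.zero_add]
    set X : String := PySem.Int.toStr (((todos.filter (fun t => pvStatus t == "completed")).length : Int))
        ++ "/" ++ PySem.Int.toStr ((todos.length : Int)) ++ " done" with hX
    -- rebracket A's tail element as "\n" ++ X
    rw [show "\n" ++ PySem.Int.toStr (((todos.filter (fun t => pvStatus t == "completed")).length : Int))
            ++ "/" ++ PySem.Int.toStr ((todos.length : Int)) ++ " done" = "\n" ++ X by
      rw [hX]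
      apply String.toList_inj.mp
      simp [String.toList_append, List.append_assoc]]
    -- unravel A's join into nested foldr blocks
    rw [join_append_tail]
    simp only [List.foldr_append, List.foldr_map, List.foldr_cons, List.foldr_nil]
    rw [← pvF0_eq, ← pvF1_eq, ← pvF2_eq]
    rw [show ("[x]" : String) = pvMarkers.getD 0 "" from rfl]
    rw [show ("[~]" : String) = pvMarkers.getD 1 "" from rfl]
    rw [show ("[ ]" : String) = pvMarkers.getD 2 "" from rfl]
    rw [block_congr 2 _ (hmemF 2), block_congr 1 _ (hmemF 1), block_congr 0 _ (hmemF 0)]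
    rw [← List.foldr_append, ← List.foldr_append]
    -- shift each line's "\n" from behind it (A) to in front of it (B)
    have hlt : ∀ t ∈ pvF 0 todos ++ pvF 1 todos ++ pvF 2 todos, pvRank t < 3 := by
      intro t ht
      simp only [List.mem_append] at ht
      rcases ht with (ht | ht) | ht <;>
        (first | have := hmemF 0 t ht | have := hmemF 1 t ht | have := hmemF 2 t ht) <;> omega
    rw [show ("" : String) ++ "\n" = "\n" by decide]
    rw [shift_newline (pvF 0 todos ++ pvF 1 todos ++ pvF 2 todos) ("\n" ++ X) hlt]
    simp only [pvCat_append, pvCat_eq_empty (pvF 3 todos) (hmemF 3)]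
    -- both sides are now the same pieces, differently bracketed
    rw [hX, pvF0_eq]
    apply String.toList_inj.mp
    simp only [String.toList_append, List.append_assoc]
    rw [show ("\n\n" : String).toList = ("\n" : String).toList ++ ("\n" : String).toList from rfl]
    rw [show ("Plan updated:\n" : String).toList = ("Plan updated:" : String).toList ++ ("\n" : String).toList from rfl]
    simp

-- ===== VERDICT (by name: the statement is the Claim_ definition above) =====
theorem format_plan_tool_output_spec : Claim_equal_format_plan_tool_output := by
  intro todos _ _
  unfold Spec_format_plan_tool_output
  exact format_plan_tool_output_eq todos
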